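-- pv_equiv track=rewrite | github.com/namburikrishnaganesh/CSA5121-Cryptography | EXP - 14.py | decrypt_otp
-- ===== SOURCE A (Python) =====
-- def char_to_num(c):
--     return ord(c.lower()) - ord('a')
--
-- def num_to_char(n):
--     return chr(ord('a') + n)
--
-- def decrypt_otp(ciphertext, key):
--     plaintext = []
--     key_index = 0
--
--     for ch in ciphertext:
--         if ch == ' ':
--             plaintext.append(' ')
--         else:
--             c = char_to_num(ch)
--             p = (c - key[key_index] + 26) % 26
--             plaintext.append(num_to_char(p))
--             key_index += 1
--     return ''.join(plaintext)
-- ===== SOURCE B (Python) =====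
-- def decrypt_otp(ciphertext, key):
--     # pass 1: extract the non-space characters
--     letters = [ch for ch in ciphertext if ch != ' ']
--     # pass 2: decrypt them; key[i] indexing so a short key still raises IndexError
--     decrypted = [chr(ord('a') + (ord(ch.lower()) - ord('a') - key[i] + 26) % 26)
--                  for i, ch in enumerate(letters)]
--     # pass 3: reinsert the spaces
--     it = iter(decrypted)
--     return ''.join(' ' if ch == ' ' else next(it) for ch in ciphertext)
-- ===== Notes on version B (the rewrite author's own statement) =====
-- stated objective: alternative
-- what changed: A decrypts in one interleaved loop carrying a key index; B makes three passes: extract the non-space characters, decrypt that list with enumerate, then reinsert spaces by walking the original text with an iterator over the decrypted letters.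
import Mathlib
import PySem

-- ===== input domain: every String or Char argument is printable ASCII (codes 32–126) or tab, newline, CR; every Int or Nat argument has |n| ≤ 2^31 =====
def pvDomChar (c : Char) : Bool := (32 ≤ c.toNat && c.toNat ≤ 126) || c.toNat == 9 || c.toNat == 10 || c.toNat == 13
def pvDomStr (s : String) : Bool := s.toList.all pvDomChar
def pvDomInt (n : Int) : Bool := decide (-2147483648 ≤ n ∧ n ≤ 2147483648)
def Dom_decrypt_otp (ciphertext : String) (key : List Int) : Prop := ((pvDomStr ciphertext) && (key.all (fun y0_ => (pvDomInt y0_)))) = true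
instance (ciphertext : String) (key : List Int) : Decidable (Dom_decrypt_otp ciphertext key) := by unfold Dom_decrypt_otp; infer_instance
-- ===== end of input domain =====

-- B reshapes A's single interleaved loop into extract/decrypt/reinsert passes (objective: alternative decomposition).

-- ===== PORT A =====
-- char_to_num(c) = ord(c.lower()) - ord('a')
def charToNum (c : Char) : Int := ((PySem.Chars.lowerChar c).toNat : Int) - 97

-- num_to_char(n) = chr(ord('a') + n)   (n is 0..25 wherever A uses it)
def numToChar (n : Int) : Char := Char.ofNat (97 + n).toNat

-- A's loop: state (plaintext, key_index); key[key_index] via pyGetD (in range under Pre_)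
def decryptLoopA (key : List Int) : List Char → List Char → Nat → List Char
  | [], pt, _ => pt
  | ch :: t, pt, ki =>
    if ch = ' ' then decryptLoopA key t (pt ++ [' ']) ki
    else decryptLoopA key t (pt ++ [numToChar (PySem.Int.mod (charToNum ch - PySem.List.pyGetD key (ki : Int) 0 + 26) 26)]) (ki + 1)

def decrypt_otp (ciphertext : String) (key : List Int) : String :=
  String.mk (decryptLoopA key ciphertext.toList [] 0)

-- ===== PORT B =====
-- pass 3: reinsert the spaces, consuming the decrypted letters like an iterator
def reinsert : List Char → List Char → List Char → List Char
  | [], out, _ => out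
  | ch :: t, out, it =>
    if ch = ' ' then reinsert t (out ++ [' ']) it
    else match it with
      | [] => reinsert t out []          -- unreachable: the iterator holds one letter per non-space char
      | d :: ds => reinsert t (out ++ [d]) ds

def decrypt_otp_alt (ciphertext : String) (key : List Int) : String :=
  let letters := ciphertext.toList.filter (fun ch => ch ≠ ' ')
  let decrypted := (PySem.List.enumerate letters 0).map
    (fun p => numToChar (PySem.Int.mod (((PySem.Chars.lowerChar p.2).toNat : Int) - 97 - PySem.List.pyGetD key p.1 0 + 26) 26))
  String.mk (reinsert ciphertext.toList [] decrypted)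

-- ===== PRECONDITION & SPEC =====
-- Pre_ excludes exactly the inputs where A raises IndexError: more non-space characters than key entries.
def Pre_decrypt_otp (ciphertext : String) (key : List Int) : Prop :=
  (ciphertext.toList.filter (fun ch => ch ≠ ' ')).length ≤ key.length
instance (ciphertext : String) (key : List Int) : Decidable (Pre_decrypt_otp ciphertext key) := by unfold Pre_decrypt_otp; infer_instance

def pvWitness_decrypt_otp : String × List Int := ("hi u", [3, 25, 0])

def Spec_decrypt_otp (ciphertext : String) (key : List Int) (out : String) : Prop := out = decrypt_otp_alt ciphertext key
instance (ciphertext : String) (key : List Int) (out : String) : Decidable (Spec_decrypt_otp ciphertext key out) := by unfold Spec_decrypt_otp; infer_instance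

-- ===== CLAIM (what is proved, stated in full; the proofs are below) =====
def Claim_equal_decrypt_otp : Prop := ∀ (ciphertext : String) (key : List Int), Dom_decrypt_otp ciphertext key → Pre_decrypt_otp ciphertext key → Spec_decrypt_otp ciphertext key (decrypt_otp ciphertext key)

-- ===== LEMMAS AND PROOFS =====

def decChar (key : List Int) (ki : Nat) (ch : Char) : Char :=
  numToChar (PySem.Int.mod (charToNum ch - PySem.List.pyGetD key (ki : Int) 0 + 26) 26)

def decList (key : List Int) : List Char → Nat → List Char
  | [], _ => []
  | ch :: t, k => decChar key k ch :: decList key t (k + 1)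

theorem decList_eq_enumerate (key : List Int) (l : List Char) (k : Nat) :
    decList key l k = (PySem.List.enumerate l (k : Int)).map
      (fun p => numToChar (PySem.Int.mod (((PySem.Chars.lowerChar p.2).toNat : Int) - 97 - PySem.List.pyGetD key p.1 0 + 26) 26)) := by
  induction l generalizing k with
  | nil => simp [decList, PySem.List.enumerate_nil]
  | cons ch t ih =>
    simp only [decList, PySem.List.enumerate_cons, List.map_cons, decChar, charToNum]
    rw [ih (k + 1)]
    push_cast
    ring_nf

theorem loopA_eq_reinsert (key : List Int) (l : List Char) (acc : List Char) (k : Nat) :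
    decryptLoopA key l acc k = reinsert l acc (decList key (l.filter (fun ch => ch ≠ ' ')) k) := by
  induction l generalizing acc k with
  | nil => simp [decryptLoopA, reinsert]
  | cons ch t ih =>
    by_cases h : ch = ' '
    · subst h
      simp [decryptLoopA, reinsert, List.filter, ih]
    · simp only [decryptLoopA, reinsert, if_neg h]
      rw [List.filter_cons_of_pos (by simpa using h)]
      simp only [decList]
      exact ih (acc ++ [decChar key k ch]) (k + 1)

-- ===== VERDICT (by name: the statement is the Claim_ definition above) =====
theorem decrypt_otp_spec : Claim_equal_decrypt_otp := by
  intro ct key _ _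
  unfold Spec_decrypt_otp decrypt_otp decrypt_otp_alt
  rw [loopA_eq_reinsert, decList_eq_enumerate]
  norm_num
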